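-- pv_equiv track=rewrite | github.com/zyksir/zyksir.github.io | main.py | binary_check_for_mono_decrease
-- ===== SOURCE A (Python) =====
-- def calculate_distance(a, x, n):
--     dist = 0
--     for i in range(n):
--         dist += abs(a[i] - x)
--     return dist
--
-- def binary_check_for_mono_decrease(left, right, a, n, d):
--     ans = right
--     while left <= right:
--         mid = (left + right) // 2
--         if calculate_distance(a, mid, n) * 2 <= d:
--             ans = min(ans, mid)
--             right = mid - 1
--         else:
--             left = mid + 1
--     return ans
-- ===== SOURCE B (Python) =====
-- def binary_check_for_mono_decrease(left, right, a, n, d):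
--     # Sort the first n values once and precompute prefix sums; each distance
--     # query of the binary search is then answered with a bisect.
--     b = sorted(a[:n]) if n > 0 else []
--     m = len(b)
--     p = [0]
--     s = 0
--     for v in b:
--         s += v
--         p.append(s)
--
--     def dist(x):
--         # hand-written bisect_left: number of elements of b smaller than x
--         lo, hi = 0, m
--         while lo < hi:
--             mid = (lo + hi) // 2
--             if b[mid] < x:
--                 lo = mid + 1
--             else:
--                 hi = mid
--         i = lo
--         return (x * i - p[i]) + (p[m] - p[i] - x * (m - i))
--
--     ans = right
--     while left <= right:
--         mid = (left + right) // 2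
--         if 2 * dist(mid) <= d:
--             ans = min(ans, mid)
--             right = mid - 1
--         else:
--             left = mid + 1
--     return ans
-- ===== Notes on version B (the rewrite author's own statement) =====
-- stated objective: alternative
-- what changed: Instead of rescanning all n elements for every binary-search probe, B sorts the first n values once, precomputes prefix sums, and answers each absolute-distance query with a hand-written bisect; it trades a one-time O(n log n) sort for O(log n) per probe.
import Mathlib
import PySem

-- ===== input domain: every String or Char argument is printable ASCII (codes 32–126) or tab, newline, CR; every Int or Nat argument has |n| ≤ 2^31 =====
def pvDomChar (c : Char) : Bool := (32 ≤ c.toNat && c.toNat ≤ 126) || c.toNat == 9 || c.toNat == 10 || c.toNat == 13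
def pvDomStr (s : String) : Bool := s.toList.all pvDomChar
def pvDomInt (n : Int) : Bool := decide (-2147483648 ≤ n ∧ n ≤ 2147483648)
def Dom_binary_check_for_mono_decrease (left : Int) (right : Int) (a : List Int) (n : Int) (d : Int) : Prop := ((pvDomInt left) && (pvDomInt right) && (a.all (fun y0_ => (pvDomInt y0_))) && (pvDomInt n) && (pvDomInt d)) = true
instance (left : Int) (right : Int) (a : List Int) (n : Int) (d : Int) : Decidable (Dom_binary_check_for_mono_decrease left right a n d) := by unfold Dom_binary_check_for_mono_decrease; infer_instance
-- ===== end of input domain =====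

-- B replaces A's rescan of the array at every binary-search probe by a one-time
-- sort + prefix sums with a bisect per probe (objective: alternative).

-- ===== PORT A =====
-- a[i] is exact under Pre_ (every index reached is in range there)
def calculate_distance (a : List Int) (x : Int) (n : Int) : Int :=
  (PySem.List.pyRange 0 n 1).foldl (fun dist i => dist + |PySem.List.pyGetD a i 0 - x|) 0

-- the while loop; fuel (right-left+1).toNat bounds the iteration count (the
-- interval [left,right] strictly shrinks each turn), so the port is exact
def bcLoopA (a : List Int) (n : Int) (d : Int) : Nat → Int → Int → Int → Int
  | 0, _, _, ans => ans
  | fuel + 1, left, right, ans =>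
    if left ≤ right then
      let mid := PySem.Int.floordiv (left + right) 2
      if calculate_distance a mid n * 2 ≤ d then
        bcLoopA a n d fuel left (mid - 1) (min ans mid)
      else
        bcLoopA a n d fuel (mid + 1) right ans
    else ans

def binary_check_for_mono_decrease (left : Int) (right : Int) (a : List Int) (n : Int) (d : Int) : Int :=
  bcLoopA a n d (right - left + 1).toNat left right right

-- ===== PORT B =====
-- b = sorted(a[:n]) if n > 0 else []
def bList (a : List Int) (n : Int) : List Int :=
  if 0 < n then PySem.List.sorted (PySem.List.slice a none (some n)) (fun v => v) false else []

-- p = [0]; s = 0; for v in b: s += v; p.append(s)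
def buildPrefix (b : List Int) : List Int :=
  (b.foldl (fun (ps : List Int × Int) v => (ps.1 ++ [ps.2 + v], ps.2 + v)) ([0], 0)).1

-- dist(x): hand-written bisect_left loop (= PySem.List.bisectLeft) + prefix sums
def dist_alt (b : List Int) (p : List Int) (x : Int) : Int :=
  (x * (PySem.List.bisectLeft b x : Int) - PySem.List.pyGetD p (PySem.List.bisectLeft b x : Int) 0)
    + (PySem.List.pyGetD p (b.length : Int) 0 - PySem.List.pyGetD p (PySem.List.bisectLeft b x : Int) 0
        - x * ((b.length : Int) - (PySem.List.bisectLeft b x : Int)))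

-- the same while loop, querying dist via the prefix sums
def bcLoopB (b : List Int) (p : List Int) (d : Int) : Nat → Int → Int → Int → Int
  | 0, _, _, ans => ans
  | fuel + 1, left, right, ans =>
    if left ≤ right then
      let mid := PySem.Int.floordiv (left + right) 2
      if 2 * dist_alt b p mid ≤ d then
        bcLoopB b p d fuel left (mid - 1) (min ans mid)
      else
        bcLoopB b p d fuel (mid + 1) right ans
    else ans

def binary_check_for_mono_decrease_alt (left : Int) (right : Int) (a : List Int) (n : Int) (d : Int) : Int :=
  bcLoopB (bList a n) (buildPrefix (bList a n)) d (right - left + 1).toNat left right right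

-- ===== PRECONDITION & SPEC =====
-- A raises IndexError iff the loop body runs (left ≤ right) with n > len(a); Pre_ excludes exactly that.
def Pre_binary_check_for_mono_decrease (left : Int) (right : Int) (a : List Int) (n : Int) (d : Int) : Prop :=
  n ≤ (a.length : Int) ∨ right < left
instance (left : Int) (right : Int) (a : List Int) (n : Int) (d : Int) : Decidable (Pre_binary_check_for_mono_decrease left right a n d) := by unfold Pre_binary_check_for_mono_decrease; infer_instance

def pvWitness_binary_check_for_mono_decrease : Int × Int × List Int × Int × Int := (0, 3, [1, 2, 5], 3, 10)

def Spec_binary_check_for_mono_decrease (left : Int) (right : Int) (a : List Int) (n : Int) (d : Int) (out : Int) : Prop := out = binary_check_for_mono_decrease_alt left right a n d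
instance (left : Int) (right : Int) (a : List Int) (n : Int) (d : Int) (out : Int) : Decidable (Spec_binary_check_for_mono_decrease left right a n d out) := by unfold Spec_binary_check_for_mono_decrease; infer_instance

-- ===== CLAIM (what is proved, stated in full; the proofs are below) =====
def Claim_equal_binary_check_for_mono_decrease : Prop := ∀ (left : Int) (right : Int) (a : List Int) (n : Int) (d : Int), Dom_binary_check_for_mono_decrease left right a n d → Pre_binary_check_for_mono_decrease left right a n d → Spec_binary_check_for_mono_decrease left right a n d (binary_check_for_mono_decrease left right a n d)


-- ===== LEMMAS AND PROOFS =====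

lemma sum_abs_all_lt (x : Int) : ∀ l : List Int, (∀ v ∈ l, v < x) →
    (l.map (fun v => |v - x|)).sum = x * l.length - l.sum := by
  intro l
  induction l with
  | nil => intro _; simp
  | cons v t ih =>
    intro h
    have hv : v < x := h v (by simp)
    have habs : |v - x| = x - v := by rw [abs_of_nonpos (by omega)]; ring
    simp only [List.map_cons, List.sum_cons, List.length_cons, List.sum_cons]
    rw [habs, ih (fun w hw => h w (by simp [hw]))]
    push_cast
    ring

lemma sum_abs_all_ge (x : Int) : ∀ l : List Int, (∀ v ∈ l, x ≤ v) →
    (l.map (fun v => |v - x|)).sum = l.sum - x * l.length := by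
  intro l
  induction l with
  | nil => intro _; simp
  | cons v t ih =>
    intro h
    have hv : x ≤ v := h v (by simp)
    have habs : |v - x| = v - x := abs_of_nonneg (by omega)
    simp only [List.map_cons, List.sum_cons, List.length_cons, List.sum_cons]
    rw [habs, ih (fun w hw => h w (by simp [hw]))]
    push_cast
    ring

lemma dist_split (b : List Int) (x : Int) (hs : b.Pairwise (· ≤ ·)) :
    (b.map (fun v => |v - x|)).sum =
      x * (PySem.List.bisectLeft b x : Int) - ((b.take (PySem.List.bisectLeft b x)).sum)
        + (b.sum - (b.take (PySem.List.bisectLeft b x)).sum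
            - x * ((b.length : Int) - (PySem.List.bisectLeft b x : Int))) := by
  obtain ⟨hle, hlt, hge⟩ := PySem.List.bisectLeft_spec b x hs
  set i := PySem.List.bisectLeft b x with hi
  have h1 : ∀ v ∈ b.take i, v < x := by
    intro v hv
    obtain ⟨j, hj, hjv⟩ := List.mem_iff_getElem.mp hv
    rw [List.length_take] at hj
    have hjlen : j < b.length := by omega
    have hjq : (b.take i)[j] = b[j] := List.getElem_take
    rw [hjq] at hjv
    subst hjv
    exact hlt j hjlen (by omega)
  have h2 : ∀ v ∈ b.drop i, x ≤ v := by
    intro v hv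
    obtain ⟨j, hj, hjv⟩ := List.mem_iff_getElem.mp hv
    rw [List.length_drop] at hj
    have hjlen : i + j < b.length := by omega
    have hjq : (b.drop i)[j] = b[i + j] := List.getElem_drop
    rw [hjq] at hjv
    subst hjv
    exact hge (i + j) hjlen (by omega)
  have hsplit : b = b.take i ++ b.drop i := (List.take_append_drop i b).symm
  have hlen_take : (b.take i).length = i := by simp; omega
  have hlen_drop : (b.drop i).length = b.length - i := by simp
  have hsum : b.sum = (b.take i).sum + (b.drop i).sum := by
    conv_lhs => rw [hsplit]
    simp
  conv_lhs => rw [hsplit]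
  rw [List.map_append, List.sum_append, sum_abs_all_lt x _ h1, sum_abs_all_ge x _ h2,
      hlen_take, hlen_drop, hsum]
  push_cast [Nat.cast_sub hle]
  ring

lemma foldl_pstep (b : List Int) : ∀ (p0 : List Int) (s : Int),
    b.foldl (fun (ps : List Int × Int) v => (ps.1 ++ [ps.2 + v], ps.2 + v)) (p0, s)
      = (p0 ++ (List.range b.length).map (fun k => s + (b.take (k + 1)).sum), s + b.sum) := by
  induction b with
  | nil => intro p0 s; simp
  | cons v t ih =>
    intro p0 s
    simp only [List.foldl_cons]
    rw [ih]
    simp only [Prod.mk.injEq]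
    refine ⟨?_, by simp only [List.sum_cons]; ring⟩
    simp only [List.length_cons, List.range_succ_eq_map, List.map_cons, List.map_map]
    simp [List.take_succ_cons, Function.comp_def, List.append_assoc, add_assoc]

lemma prefix_get (b : List Int) (i : Nat) (hi : i ≤ b.length) :
    PySem.List.pyGetD (buildPrefix b) (i : Int) 0 = (b.take i).sum := by
  unfold buildPrefix
  rw [foldl_pstep b [0] 0]
  rw [PySem.List.pyGetD_natCast]
  cases i with
  | zero => simp
  | succ k =>
    have hk : k < b.length := by omega
    simp only [List.cons_append, List.nil_append]
    rw [List.getD_eq_getElem?_getD]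
    simp [hk]

lemma bList_perm (a : List Int) (n : Int) (hn0 : 0 < n) :
    (bList a n).Perm (a.take n.toNat) := by
  unfold bList
  rw [if_pos hn0, PySem.List.slice_to a (by omega : (0:Int) ≤ n)]
  exact PySem.List.sorted_perm _ _ _

lemma dist_eq (a : List Int) (n : Int) (hn : n ≤ (a.length : Int)) (x : Int) :
    calculate_distance a x n = dist_alt (bList a n) (buildPrefix (bList a n)) x := by
  by_cases hn0 : 0 < n
  · -- b is a sorted permutation of a[:n]
    set t := a.take n.toNat with ht
    have htlen : t.length = n.toNat := by
      rw [ht, List.length_take]; omega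
    set b := bList a n with hb
    have hperm : b.Perm t := bList_perm a n hn0
    have hblen : b.length = n.toNat := by rw [hperm.length_eq, htlen]
    have hpair : b.Pairwise (· ≤ ·) := by
      rw [hb]; unfold bList
      rw [if_pos hn0]
      exact PySem.List.sorted_pairwise _ _
    -- A's loop is the sum of |v - x| over a[:n]
    have hA : calculate_distance a x n = (t.map (fun v => |v - x|)).sum := by
      unfold calculate_distance
      have hcongr : ∀ (acc : Int) (j : Int), j ∈ PySem.List.pyRange 0 n 1 →
          acc + |PySem.List.pyGetD a j 0 - x| = acc + |PySem.List.pyGetD t j 0 - x| := by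
        intro acc j hj
        rw [PySem.List.mem_pyRange_one] at hj
        have hja : j.toNat < a.length := by omega
        have hjt : j.toNat < t.length := by omega
        rw [PySem.List.pyGetD_eq_getElem a 0 hj.1 (by omega),
            PySem.List.pyGetD_eq_getElem t 0 hj.1 (by omega)]
        have : t[j.toNat] = a[j.toNat] := List.getElem_take
        rw [this]
      rw [PySem.List.foldl_congr_mem _ _ _ _
            (by intro acc j hj; exact hcongr acc j hj)]
      have hnlen : n = PySem.List.len t := by
        unfold PySem.List.len; omega
      rw [hnlen, PySem.List.foldl_pyRange_zero_pyGetD t 0 (fun acc v => acc + |v - x|) 0,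
          PySem.List.foldl_add]
      simp
    -- B's query equals the same sum, via the bisect split and the prefix sums
    obtain ⟨hle, _, _⟩ := PySem.List.bisectLeft_spec b x hpair
    have hB : dist_alt b (buildPrefix b) x = (b.map (fun v => |v - x|)).sum := by
      unfold dist_alt
      rw [prefix_get b (PySem.List.bisectLeft b x) hle, prefix_get b b.length le_rfl,
          List.take_length, dist_split b x hpair]
    rw [hA, hB, (hperm.map (fun v => |v - x|)).sum_eq]
  · -- n ≤ 0: both distances are 0
    have hA : calculate_distance a x n = 0 := by
      unfold calculate_distance
      rw [PySem.List.pyRange_one_eq_nil (by omega)]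
      simp
    have hbnil : bList a n = [] := by unfold bList; rw [if_neg hn0]
    rw [hA, hbnil]
    unfold dist_alt buildPrefix
    simp [PySem.List.bisectLeft, PySem.List.bisectLeftLoop, PySem.List.pyGetD_zero]

lemma loops_eq (a : List Int) (n d : Int) (b p : List Int)
    (hd : ∀ x, calculate_distance a x n = dist_alt b p x) :
    ∀ (fuel : Nat) (left right ans : Int),
      bcLoopA a n d fuel left right ans = bcLoopB b p d fuel left right ans := by
  intro fuel
  induction fuel with
  | zero => intro _ _ _; rfl
  | succ k ih =>
    intro l r ans
    simp only [bcLoopA, bcLoopB]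
    by_cases hlr : l ≤ r
    · simp only [if_pos hlr]
      have hc : calculate_distance a (PySem.Int.floordiv (l + r) 2) n * 2
          = 2 * dist_alt b p (PySem.Int.floordiv (l + r) 2) := by
        rw [hd]; ring
      rw [hc]
      by_cases h2 : 2 * dist_alt b p (PySem.Int.floordiv (l + r) 2) ≤ d
      · rw [if_pos h2, if_pos h2, ih]
      · rw [if_neg h2, if_neg h2, ih]
    · simp only [if_neg hlr]

-- ===== VERDICT (by name: the statement is the Claim_ definition above) =====
theorem binary_check_for_mono_decrease_spec : Claim_equal_binary_check_for_mono_decrease := by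
  intro left right a n d _ hpre
  unfold Spec_binary_check_for_mono_decrease binary_check_for_mono_decrease binary_check_for_mono_decrease_alt
  rcases hpre with hn | hrl
  · exact loops_eq a n d _ _ (dist_eq a n hn) _ left right right
  · have h0 : (right - left + 1).toNat = 0 := by omega
    rw [h0]
    rfl
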